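-- pv_equiv track=rewrite | github.com/LuisMMMTS/Blackjack-Game | Blackjack.py | soft
-- ===== SOURCE A (Python) =====
-- def valorcarta(a):
--     """Calcula o valor de uma carta.
--
--     Requires:Uma carta(tuplo com par de strings (face, naipe))
--     Ensures: Um inteiro com o valor da carta
--     """
--     valorcarta=0
--     if ("10"==a) or ("K"==a) or ("Q"==a) or ("J"==a):
--        valorcarta=10
--     elif "9"==a:
--        valorcarta=9
--     elif "8"==a:
--        valorcarta=8
--     elif "7"==a:
--         valorcarta=7
--     elif "6"==a:
--         valorcarta=6
--     elif "5"==a: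
--         valorcarta=5
--     elif "4"==a:
--         valorcarta=4
--     elif "3"==a:
--         valorcarta=3
--     elif "2"==a:
--         valorcarta=2
--     elif "A"==a:
--         valorcarta=11
--     return(valorcarta)
--
-- def valor(mao):
--     """Calcula o valor de uma mão.
--     Por exemplo, dada a seguinte mão:
--         [("5", "P"), ("K", "C")]
--     A função deve devolver o inteiro 15.
--
--     Requires: Uma mão (lista de pares de strings (face, naipe))
--     Ensures: Um inteiro com o valor total da mão
--     """
--     s=0
--     As=0
--     for carta in mao:
--         a=carta[0]
--         s=s+valorcarta(a)
--         if "A"==a: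
--            As+=1
--     while s>21 and As>0:
--         s-=10
--         As-=1
--     return(s)
--
-- def soft(mao):
--     """Verifica se uma mão é 'soft' ou 'hard', ou seja, se a adição de mais uma
--     carta à mão nunca fará o jogador 'rebentar'.
--     Por exemplo, dada a seguinte mão:
--         [("A", "P"), ("6", "C")]
--     A função deve devolver o valor True.
--
--     Requires: mao: uma mão (lista de pares de strings (face, naipe))
--     Ensures: um Booleano (True ou False). True se a adição de uma carta à mão
--     nunca possa fazer o seu valor ultrapassar os 21 pontos (mão 'soft'). False
--     False caso a adição de uma carta à mão a possa fazer ultrapassar os 21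
--     pontos (mão 'hard').
--     """
--     s=0
--     As=0
--     for carta in mao:
--             a=carta[0]
--             s=s+valorcarta(a)
--             if "A"==a:
--                As+=1
--     while s>21 and As>0:
--             s-=10
--             As-=1
--     valorcomasavaler1=valor(mao)-10*As
--     diferença=21-valorcomasavaler1
--     if diferença>=10:
--            resposta=True
--     if diferença<10:
--            resposta=False
--     return resposta
-- ===== SOURCE B (Python) =====
-- _MINVAL = {"10": 10, "K": 10, "Q": 10, "J": 10, "9": 9, "8": 8, "7": 7,
--            "6": 6, "5": 5, "4": 4, "3": 3, "2": 2, "A": 1}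
--
-- def soft(mao):
--     return sum(_MINVAL.get(carta[0], 0) for carta in mao) <= 11
-- ===== Notes on version B (the rewrite author's own statement) =====
-- stated objective: simpler
-- what changed: B replaces the ace-adjustment while-loop, the second full valor(mao) pass and the subtraction algebra with a single sum of minimum card values (ace = 1) from a lookup table, compared against 11.
import Mathlib
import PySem

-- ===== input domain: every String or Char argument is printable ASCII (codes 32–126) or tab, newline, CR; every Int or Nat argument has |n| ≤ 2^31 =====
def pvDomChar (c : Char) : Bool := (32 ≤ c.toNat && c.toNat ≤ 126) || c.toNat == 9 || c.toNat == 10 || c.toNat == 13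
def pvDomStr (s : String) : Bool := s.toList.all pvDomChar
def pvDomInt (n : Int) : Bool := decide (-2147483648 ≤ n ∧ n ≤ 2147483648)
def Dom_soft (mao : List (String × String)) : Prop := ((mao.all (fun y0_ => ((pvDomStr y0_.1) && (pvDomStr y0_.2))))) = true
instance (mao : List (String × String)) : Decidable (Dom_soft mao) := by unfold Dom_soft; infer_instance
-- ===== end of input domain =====

-- B replaces A's while-loop + second valor pass + subtraction algebra with one sum of minimum card values compared against 11.

-- ===== PORT A =====
def valorcarta (a : String) : Int :=
  if a = "10" ∨ a = "K" ∨ a = "Q" ∨ a = "J" then 10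
  else if a = "9" then 9
  else if a = "8" then 8
  else if a = "7" then 7
  else if a = "6" then 6
  else if a = "5" then 5
  else if a = "4" then 4
  else if a = "3" then 3
  else if a = "2" then 2
  else if a = "A" then 11
  else 0

-- the card-summing loop shared verbatim by valor and soft: returns (s, As)
def cardLoop (mao : List (String × String)) : Int × Nat :=
  mao.foldl (fun acc carta =>
    (acc.1 + valorcarta carta.1, if carta.1 = "A" then acc.2 + 1 else acc.2)) (0, 0)

-- the 'while s>21 and As>0' loop (As is a count, always ≥ 0, so Nat)
def aceAdjust (s : Int) (as_ : Nat) : Int × Nat :=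
  if h : s > 21 ∧ as_ ≠ 0 then aceAdjust (s - 10) (as_ - 1) else (s, as_)
termination_by as_
decreasing_by omega

def valor (mao : List (String × String)) : Int :=
  let p := cardLoop mao
  (aceAdjust p.1 p.2).1

def soft (mao : List (String × String)) : Bool :=
  let p := cardLoop mao
  let q := aceAdjust p.1 p.2
  let valorcomasavaler1 := valor mao - 10 * (q.2 : Int)
  let diferenca := 21 - valorcomasavaler1
  if diferenca ≥ 10 then true else false

-- ===== PORT B =====
def minvalDict : PySem.Dict String Int :=
  PySem.Dict.mk [("10", 10), ("K", 10), ("Q", 10), ("J", 10), ("9", 9), ("8", 8), ("7", 7),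
   ("6", 6), ("5", 5), ("4", 4), ("3", 3), ("2", 2), ("A", 1)]

def soft_alt (mao : List (String × String)) : Bool :=
  decide ((mao.foldl (fun t carta => t + PySem.Dict.getD minvalDict carta.1 0) 0) ≤ 11)

-- ===== PRECONDITION & SPEC =====
def Spec_soft (mao : List (String × String)) (out : Bool) : Prop := out = soft_alt mao
instance (mao : List (String × String)) (out : Bool) : Decidable (Spec_soft mao out) := by unfold Spec_soft; infer_instance

-- ===== CLAIM (what is proved, stated in full; the proofs are below) =====
def Claim_equal_soft : Prop := ∀ (mao : List (String × String)), Dom_soft mao → Spec_soft mao (soft mao)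

-- ===== LEMMAS AND PROOFS =====

-- B's table value = A's card value minus 10 for an ace
theorem minval_eq (a : String) :
    PySem.Dict.getD minvalDict a 0 = valorcarta a - (if a = "A" then 10 else 0) := by
  by_cases h1 : a = "10"; · subst h1; decide
  by_cases h2 : a = "K"; · subst h2; decide
  by_cases h3 : a = "Q"; · subst h3; decide
  by_cases h4 : a = "J"; · subst h4; decide
  by_cases h5 : a = "9"; · subst h5; decide
  by_cases h6 : a = "8"; · subst h6; decide
  by_cases h7 : a = "7"; · subst h7; decide
  by_cases h8 : a = "6"; · subst h8; decide
  by_cases h9 : a = "5"; · subst h9; decide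
  by_cases h10 : a = "4"; · subst h10; decide
  by_cases h11 : a = "3"; · subst h11; decide
  by_cases h12 : a = "2"; · subst h12; decide
  by_cases h13 : a = "A"; · subst h13; decide
  simp [minvalDict, valorcarta, PySem.Dict.getD, PySem.Dict.get?,
        h1, h2, h3, h4, h5, h6, h7, h8, h9, h10, h11, h12, h13,
        Ne.symm h1, Ne.symm h2, Ne.symm h3, Ne.symm h4, Ne.symm h5, Ne.symm h6,
        Ne.symm h7, Ne.symm h8, Ne.symm h9, Ne.symm h10, Ne.symm h11, Ne.symm h12, Ne.symm h13]

-- the while-loop preserves s - 10*As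
theorem aceAdjust_inv (s : Int) (as_ : Nat) :
    (aceAdjust s as_).1 - 10 * ((aceAdjust s as_).2 : Int) = s - 10 * (as_ : Int) := by
  fun_induction aceAdjust s as_ with
  | case1 s as_ h ih =>
      rw [ih]
      have hpos : as_ ≠ 0 := h.2
      have h2 : ((as_ - 1 : Nat) : Int) = (as_ : Int) - 1 := by omega
      rw [h2]; ring
  | case2 s as_ h => rfl

-- B's single-pass sum equals s - 10*As of A's card loop, generalized over accumulators
theorem loop_eq (mao : List (String × String)) (s : Int) (as_ : Nat) (t : Int)
    (h : t = s - 10 * (as_ : Int)) :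
    mao.foldl (fun t carta => t + PySem.Dict.getD minvalDict carta.1 0) t
      = (mao.foldl (fun acc carta =>
          (acc.1 + valorcarta carta.1, if carta.1 = "A" then acc.2 + 1 else acc.2)) (s, as_)).1
        - 10 * (((mao.foldl (fun acc carta =>
          (acc.1 + valorcarta carta.1, if carta.1 = "A" then acc.2 + 1 else acc.2)) (s, as_)).2 : Nat) : Int) := by
  induction mao generalizing s as_ t with
  | nil => simpa using h
  | cons c rest ih =>
      simp only [List.foldl_cons]
      apply ih
      rw [h, minval_eq c.1]
      by_cases hA : c.1 = "A" <;> simp [hA] <;> ring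

-- ===== VERDICT (by name: the statement is the Claim_ definition above) =====
theorem soft_spec : Claim_equal_soft := by
  intro mao _
  unfold Spec_soft soft soft_alt valor
  have hmin := loop_eq mao 0 0 0 (by simp)
  have hadj := aceAdjust_inv (cardLoop mao).1 (cardLoop mao).2
  simp only [cardLoop] at *
  split_ifs with h
  · symm; simp; omega
  · symm; simp; omega
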